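-- pv_equiv track=rewrite | github.com/Chris-Stoneforged/advent-of-code | 2015/day6/part2.py | turn_on
-- ===== SOURCE A (Python) =====
-- def turn_on(lights, new, max_volume):
--     new_lights = {}
--     remaining = new.copy()
--
--     if max_volume == 0:
--         new_lights[1] = new
--     else:
--         for i in range(max_volume, 0, -1):
--             new_lights[i + 1] = (lights.get(i + 1, set()) - new) | (lights.get(i, set()) & new)
--             remaining -= lights.get(i, set())
--         new_lights[1] = (lights.get(1, set()) - new) | remaining
--
--     return new_lights
-- ===== SOURCE B (Python) =====
-- def turn_on(lights, new, max_volume):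
--     # Route every light individually to its destination level (a flat stream of
--     # (target, light) moves), then group the stream into pre-initialized buckets.
--     if max_volume == 0:
--         return {1: new}
--     moves = []
--     for i in range(max_volume + 1, 0, -1):
--         for x in lights.get(i, set()):
--             if i <= max_volume and x in new:
--                 moves.append((i + 1, x))
--             elif x not in new:
--                 moves.append((i, x))
--     touched = set()
--     for i in range(1, max_volume + 1):
--         touched |= lights.get(i, set())
--     for x in new:
--         if x not in touched:
--             moves.append((1, x))
--     out = {j: [] for j in range(max_volume + 1, 0, -1)}
--     for t, x in moves:
--         out[t].append(x)
--     return {j: set(b) for j, b in out.items()}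
-- ===== Notes on version B (the rewrite author's own statement) =====
-- stated objective: alternative
-- what changed: B abandons A's per-level set algebra ((lights[i+1]-new)|(lights[i]&new) per output level) and instead routes each light individually: one pass emits a flat stream of (target,light) moves (promote if in new, keep otherwise), appends the untouched new lights as moves to level 1, and groups the stream into pre-initialized per-level buckets.
-- outside the precondition, e.g. on turn_on({}, {1}, -1): A returns {1: {1}}, B raises KeyError
import Mathlib
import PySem

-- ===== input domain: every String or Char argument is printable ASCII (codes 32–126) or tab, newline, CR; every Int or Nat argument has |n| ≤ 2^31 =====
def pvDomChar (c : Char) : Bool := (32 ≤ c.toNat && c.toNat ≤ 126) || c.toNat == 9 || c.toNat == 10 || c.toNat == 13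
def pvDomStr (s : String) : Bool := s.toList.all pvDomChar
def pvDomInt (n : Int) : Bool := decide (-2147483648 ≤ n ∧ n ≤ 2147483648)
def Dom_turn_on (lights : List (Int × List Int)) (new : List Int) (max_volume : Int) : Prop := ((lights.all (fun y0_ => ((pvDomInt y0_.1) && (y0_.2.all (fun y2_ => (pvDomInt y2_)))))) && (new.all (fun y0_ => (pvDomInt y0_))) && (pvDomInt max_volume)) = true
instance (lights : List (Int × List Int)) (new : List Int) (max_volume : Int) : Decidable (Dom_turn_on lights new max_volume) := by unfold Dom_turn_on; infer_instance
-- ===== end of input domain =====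

-- B replaces A's per-level set algebra by per-light routing: one pass emits a flat
-- stream of (target, light) moves which is then grouped into pre-initialized buckets;
-- same cost class, a different algorithm (element routing + grouping).

-- ===== PORT A =====
def turn_on (lights : List (Int × List Int)) (new : List Int) (max_volume : Int) : List (Int × List Int) :=
  let d : PySem.Dict Int (List Int) := PySem.Dict.mk lights
  let newS : PySem.Set Int := PySem.Set.ofList new
  let new_lights : PySem.Dict Int (List Int) := PySem.Dict.mk []
  if max_volume == 0 then
    (new_lights.insert 1 newS).items
  else
    let st := (PySem.List.pyRange max_volume 0 (-1)).foldl
      (fun (st : PySem.Dict Int (List Int) × List Int) i =>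
        (st.1.insert (i + 1)
            (PySem.Set.union
              (PySem.Set.diff (PySem.Set.ofList (d.getD (i + 1) [])) newS)
              (PySem.Set.inter (PySem.Set.ofList (d.getD i [])) newS)),
         PySem.Set.diff st.2 (PySem.Set.ofList (d.getD i []))))
      (new_lights, newS)
    (st.1.insert 1
      (PySem.Set.union (PySem.Set.diff (PySem.Set.ofList (d.getD 1 [])) newS) st.2)).items

-- ===== PORT B =====
def turn_on_alt (lights : List (Int × List Int)) (new : List Int) (max_volume : Int) : List (Int × List Int) :=
  if max_volume == 0 then
    [(1, PySem.Set.ofList new)]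
  else
    let d : PySem.Dict Int (List Int) := PySem.Dict.mk lights
    let newS : PySem.Set Int := PySem.Set.ofList new
    -- route every light to its destination level, as a flat stream of moves
    let moves : List (Int × Int) :=
      (PySem.List.pyRange (max_volume + 1) 0 (-1)).foldl (fun ms i =>
        (PySem.Set.ofList (d.getD i [])).foldl (fun ms x =>
          if i ≤ max_volume && newS.contains x then ms ++ [(i + 1, x)]
          else if !newS.contains x then ms ++ [(i, x)]
          else ms) ms) []
    let touched : PySem.Set Int :=
      (PySem.List.pyRange 1 (max_volume + 1)).foldl
        (fun s i => PySem.Set.union s (PySem.Set.ofList (d.getD i []))) PySem.Set.empty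
    let moves := moves ++
      newS.foldl (fun ms x => if !touched.contains x then ms ++ [((1 : Int), x)] else ms) []
    -- group the stream into pre-initialized buckets
    let out0 : PySem.Dict Int (List Int) :=
      (PySem.List.pyRange (max_volume + 1) 0 (-1)).foldl
        (fun o j => o.insert j ([] : List Int)) (PySem.Dict.mk [])
    let out := moves.foldl (fun o p => o.modify p.1 [] (fun b => b ++ [p.2])) out0
    out.items.map (fun p => (p.1, PySem.Set.ofList p.2))

-- ===== PRECONDITION & SPEC =====
-- Pre_ restricts to the task's natural domain of non-negative brightness caps: on negative
-- max_volume (a nonsensical cap) A still returns {1: (lights.get(1,set())-new)|new} while B's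
-- bucket table has no levels, so grouping the new lights raises KeyError.
def Pre_turn_on (lights : List (Int × List Int)) (new : List Int) (max_volume : Int) : Prop := 0 ≤ max_volume
instance (lights : List (Int × List Int)) (new : List Int) (max_volume : Int) : Decidable (Pre_turn_on lights new max_volume) := by unfold Pre_turn_on; infer_instance
def pvWitness_turn_on : (List (Int × List Int)) × List Int × Int := ([(1, [2, 3]), (2, [4])], [2, 4], 2)

def Spec_turn_on (lights : List (Int × List Int)) (new : List Int) (max_volume : Int) (out : List (Int × List Int)) : Prop := out = turn_on_alt lights new max_volume
instance (lights : List (Int × List Int)) (new : List Int) (max_volume : Int) (out : List (Int × List Int)) : Decidable (Spec_turn_on lights new max_volume out) := by unfold Spec_turn_on; infer_instance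

-- ===== CLAIM (what is proved, stated in full; the proofs are below) =====
def Claim_equal_turn_on : Prop := ∀ (lights : List (Int × List Int)) (new : List Int) (max_volume : Int), Dom_turn_on lights new max_volume → Pre_turn_on lights new max_volume → Spec_turn_on lights new max_volume (turn_on lights new max_volume)

-- ===== LEMMAS AND PROOFS =====

-- the set stored at input level i, and the per-level sets both programs compute
def pvGetS (lights : List (Int × List Int)) (i : Int) : PySem.Set Int :=
  PySem.Set.ofList ((PySem.Dict.mk lights).getD i [])
def pvKept (lights : List (Int × List Int)) (new : List Int) (i : Int) : PySem.Set Int :=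
  PySem.Set.diff (pvGetS lights i) (PySem.Set.ofList new)
def pvProm (lights : List (Int × List Int)) (new : List Int) (i : Int) : PySem.Set Int :=
  PySem.Set.inter (pvGetS lights i) (PySem.Set.ofList new)
def pvOut (lights : List (Int × List Int)) (new : List Int) (i : Int) : PySem.Set Int :=
  PySem.Set.union (pvKept lights new (i + 1)) (pvProm lights new i)

-- B's routing function and per-level move segment
def pvRoute (new : List Int) (max_volume i x : Int) : List (Int × Int) :=
  if i ≤ max_volume && (PySem.Set.ofList new).contains x then [(i + 1, x)]
  else if !(PySem.Set.ofList new).contains x then [(i, x)]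
  else []
def pvSeg (lights : List (Int × List Int)) (new : List Int) (max_volume i : Int) : List (Int × Int) :=
  (pvGetS lights i).flatMap (pvRoute new max_volume i)

lemma pyRange_desc_eq_map (n : Nat) :
    PySem.List.pyRange (n : Int) 0 (-1) = (List.range n).map (fun k : Nat => (n : Int) - (k : Int)) := by
  rw [PySem.List.pyRange_neg_one]
  apply List.map_congr_left
  intro k hk
  simp only [List.mem_range] at hk
  omega

lemma foldl_diff_eq_filter (lights : List (Int × List Int)) (L : List Int) (s : PySem.Set Int) :
    L.foldl (fun r i => PySem.Set.diff r (pvGetS lights i)) s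
      = s.filter (fun x => L.all (fun i => !(pvGetS lights i).contains x)) := by
  induction L generalizing s with
  | nil => simp
  | cons i L ih =>
    rw [List.foldl_cons, ih]
    simp only [PySem.Set.diff, List.filter_filter, List.all_cons]
    exact List.filter_congr (fun x _ => by rw [Bool.and_comm])

lemma turn_on_normal (lights : List (Int × List Int)) (new : List Int) (max_volume : Int)
    (h1 : 1 ≤ max_volume) :
    turn_on lights new max_volume
      = (PySem.List.pyRange max_volume 0 (-1)).map (fun i => (i + 1, pvOut lights new i))
        ++ [(1, PySem.Set.union (pvKept lights new 1)
              ((PySem.List.pyRange max_volume 0 (-1)).foldl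
                (fun r i => PySem.Set.diff r (pvGetS lights i)) (PySem.Set.ofList new)))] := by
  simp only [pvOut, pvKept, pvProm, pvGetS]
  simp only [turn_on]
  rw [if_neg (by simp; omega)]
  rw [PySem.List.foldl_prod_mk
    (f := fun (nl : PySem.Dict Int (List Int)) (i : Int) => nl.insert (i + 1)
            (PySem.Set.union
              (PySem.Set.diff (PySem.Set.ofList ((PySem.Dict.mk lights).getD (i + 1) [])) (PySem.Set.ofList new))
              (PySem.Set.inter (PySem.Set.ofList ((PySem.Dict.mk lights).getD i [])) (PySem.Set.ofList new))))
    (g := fun (r : PySem.Set Int) (i : Int) => PySem.Set.diff r (PySem.Set.ofList ((PySem.Dict.mk lights).getD i [])))]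
  obtain ⟨n, hn⟩ : ∃ n : Nat, (n : Int) = max_volume := ⟨max_volume.toNat, by omega⟩
  have hmem : ∀ x ∈ PySem.List.pyRange max_volume 0 (-1), 1 ≤ x := by
    rw [← hn, pyRange_desc_eq_map]
    intro x hx
    simp only [List.mem_map, List.mem_range] at hx
    obtain ⟨k, hk, rfl⟩ := hx
    omega
  have hnodup : ((PySem.List.pyRange max_volume 0 (-1)).map (fun i : Int => i + 1)).Nodup := by
    rw [← hn, pyRange_desc_eq_map, List.map_map]
    exact (List.nodup_range).map (fun a b hab => by simp [Function.comp] at hab; omega)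
  have hDitems := PySem.Dict.items_foldl_insert_fresh (PySem.List.pyRange max_volume 0 (-1))
        (fun i : Int => i + 1)
        (fun i : Int => PySem.Set.union
          (PySem.Set.diff (PySem.Set.ofList ((PySem.Dict.mk lights).getD (i + 1) [])) (PySem.Set.ofList new))
          (PySem.Set.inter (PySem.Set.ofList ((PySem.Dict.mk lights).getD i [])) (PySem.Set.ofList new)))
        (PySem.Dict.mk []) (fun a _ => rfl) hnodup
  simp only [List.nil_append] at hDitems
  have hc : (List.foldl
                (fun (nl : PySem.Dict Int (List Int)) (i : Int) =>
                  nl.insert (i + 1)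
                    (((PySem.Set.ofList ((PySem.Dict.mk lights).getD (i + 1) [])).diff (PySem.Set.ofList new)).union
                      ((PySem.Set.ofList ((PySem.Dict.mk lights).getD i [])).inter (PySem.Set.ofList new))))
                (PySem.Dict.mk []) (PySem.List.pyRange max_volume 0 (-1))).contains 1 = false := by
    simp only [PySem.Dict.contains, hDitems, List.any_map, List.any_eq_false]
    intro i hi
    have := hmem i hi
    simp only [Function.comp, beq_iff_eq]
    omega
  rw [PySem.Dict.items_insert_of_not_contains _ _ hc, hDitems]

-- generic list lemmas for the B side
lemma pvFilter_flatMap {α β : Type} (l : List α) (g : α → List β) (p : β → Bool) :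
    (l.flatMap g).filter p = l.flatMap (fun a => (g a).filter p) := by
  induction l with
  | nil => rfl
  | cons a l ih => simp [List.flatMap_cons, List.filter_append, ih]

lemma pvFlatMap_if {α β : Type} (l : List α) (p : α → Bool) (f : α → β) :
    (l.flatMap (fun x => if p x then [f x] else [])) = (l.filter p).map f := by
  induction l with
  | nil => rfl
  | cons a l ih => by_cases h : p a <;> simp [List.flatMap_cons, h, ih]

lemma pvFlatMap_countdown {β : Type} (f : Int → List β) (c : Int) (h1 : 1 ≤ c)
    (hz : ∀ i : Int, 1 ≤ i → i ≠ c → i ≠ c - 1 → f i = []) (n : Nat) :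
    (PySem.List.pyRange (n : Int) 0 (-1)).flatMap f
      = (if c ≤ (n : Int) then f c else []) ++ (if 2 ≤ c ∧ c - 1 ≤ (n : Int) then f (c - 1) else []) := by
  induction n with
  | zero =>
    rw [PySem.List.pyRange_neg_one_eq_nil (by norm_num)]
    rw [if_neg (by omega), if_neg (by omega)]
    rfl
  | succ m ih =>
    have hcons : PySem.List.pyRange ((m + 1 : Nat) : Int) 0 (-1)
        = ((m + 1 : Nat) : Int) :: PySem.List.pyRange (((m + 1 : Nat) : Int) - 1) 0 (-1) :=
      PySem.List.pyRange_neg_one_cons (by positivity)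
    rw [show (((m + 1 : Nat) : Int) - 1) = ((m : Nat) : Int) by push_cast; ring] at hcons
    rw [hcons, List.flatMap_cons, ih]
    push_cast
    by_cases hc : c = (m : Int) + 1
    · rw [show ((m : Int) + 1) = c from hc.symm]
      split_ifs <;> first | omega | simp
    · by_cases hc1 : c - 1 = (m : Int) + 1
      · rw [show ((m : Int) + 1) = c - 1 from hc1.symm]
        split_ifs <;> first | omega | simp
      · rw [hz ((m : Int) + 1) (by omega) (by omega) (by omega)]
        split_ifs <;> first | omega | simp

lemma pvMem_foldl_union (lights : List (Int × List Int)) (L : List Int) (s : PySem.Set Int) (x : Int) :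
    x ∈ L.foldl (fun s i => PySem.Set.union s (pvGetS lights i)) s
      ↔ x ∈ s ∨ ∃ i ∈ L, x ∈ pvGetS lights i := by
  induction L generalizing s with
  | nil => simp
  | cons a L ih =>
    rw [List.foldl_cons, ih]
    rw [PySem.Set.mem_union]
    simp only [List.mem_cons]
    constructor
    · rintro ((h | h) | ⟨i, hi, h⟩)
      · exact Or.inl h
      · exact Or.inr ⟨a, Or.inl rfl, h⟩
      · exact Or.inr ⟨i, Or.inr hi, h⟩
    · rintro (h | ⟨i, (rfl | hi), h⟩)
      · exact Or.inl (Or.inl h)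
      · exact Or.inl (Or.inr h)
      · exact Or.inr ⟨i, hi, h⟩

-- nodup / disjoint set-append lemmas
lemma pvUnion_eq_append (a b : PySem.Set Int) (hb : b.Nodup) (hd : ∀ x ∈ b, x ∉ a) :
    PySem.Set.union a b = a ++ b := by
  simp only [PySem.Set.union]
  exact PySem.Set.update_eq_append_of_disjoint _ _ hb hd

lemma pvOfList_append (a b : List Int) (ha : a.Nodup) (hb : b.Nodup) (hd : ∀ x ∈ b, x ∉ a) :
    PySem.Set.ofList (a ++ b) = a ++ b :=
  PySem.Set.ofList_eq_self_of_nodup _ (List.Nodup.append ha hb (fun x hx hy => hd x hy hx))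

-- the descending bucket-key range, split as A's keys
lemma pvR_split (max_volume : Int) (h : 1 ≤ max_volume) :
    PySem.List.pyRange (max_volume + 1) 0 (-1)
      = (PySem.List.pyRange max_volume 0 (-1)).map (fun i => i + 1) ++ [1] := by
  obtain ⟨n, hn⟩ : ∃ n : Nat, (n : Int) = max_volume := ⟨max_volume.toNat, by omega⟩
  rw [← hn, show ((n : Int) + 1) = ((n + 1 : Nat) : Int) by push_cast; ring,
    pyRange_desc_eq_map, pyRange_desc_eq_map, List.map_map]
  obtain ⟨m, rfl⟩ : ∃ m : Nat, m + 1 = n := ⟨n - 1, by omega⟩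
  rw [List.range_succ, List.map_append]
  congr 1
  · apply List.map_congr_left
    intro k hk
    simp only [List.mem_range] at hk
    simp only [Function.comp]
    push_cast; ring
  · simp

lemma pvNodup_R (max_volume : Int) :
    (PySem.List.pyRange (max_volume + 1) 0 (-1)).Nodup := by
  rw [PySem.List.pyRange_neg_one_eq_reverse, List.nodup_reverse]
  exact PySem.List.nodup_pyRange_one _ _

lemma pvMem_R (max_volume x : Int) :
    x ∈ PySem.List.pyRange (max_volume + 1) 0 (-1) ↔ 0 < x ∧ x ≤ max_volume + 1 :=
  PySem.List.mem_pyRange_neg_one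

-- the filtered routing of one light
lemma pvRoute_filter (new : List Int) (max_volume i c x : Int) :
    (pvRoute new max_volume i x).filter (fun p => p.1 == c)
      = if c = i + 1 ∧ i ≤ max_volume then
          (if (PySem.Set.ofList new).contains x then [(i + 1, x)] else [])
        else if c = i then
          (if !(PySem.Set.ofList new).contains x then [(i, x)] else [])
        else [] := by
  unfold pvRoute
  by_cases hm : i ≤ max_volume <;> cases hx : (PySem.Set.ofList new).contains x <;>
    simp only [hm, hx, decide_true, decide_false, Bool.true_and, Bool.false_and,
      Bool.and_true, Bool.and_false, Bool.not_true, Bool.not_false,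
      if_true, if_false, List.filter_cons, List.filter_nil, beq_iff_eq] <;>
    split_ifs <;> first | rfl | omega | (simp_all; all_goals omega)

-- the filtered move segment of one level
lemma pvSeg_filter (lights : List (Int × List Int)) (new : List Int) (max_volume i c : Int) :
    (pvSeg lights new max_volume i).filter (fun p => p.1 == c)
      = if c = i then (pvKept lights new i).map (fun x => (i, x))
        else if c = i + 1 ∧ i ≤ max_volume then (pvProm lights new i).map (fun x => (i + 1, x))
        else [] := by
  unfold pvSeg
  rw [pvFilter_flatMap]
  simp only [pvRoute_filter]
  by_cases hc1 : c = i + 1 ∧ i ≤ max_volume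
  · rw [if_neg (by omega)]
    rw [if_pos hc1]
    simp only [if_pos hc1]
    rw [pvFlatMap_if]
    simp only [pvProm, PySem.Set.inter]
  · simp only [if_neg hc1]
    by_cases hc : c = i
    · rw [if_pos hc]
      simp only [if_pos hc]
      rw [pvFlatMap_if]
      simp only [pvKept, PySem.Set.diff]
    · rw [if_neg hc]
      simp only [if_neg hc]
      simp

-- B's remaining lights and full move stream
def pvRem (lights : List (Int × List Int)) (new : List Int) (max_volume : Int) : List Int :=
  (PySem.Set.ofList new).filter (fun x =>
    !((PySem.List.pyRange 1 (max_volume + 1)).foldl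
        (fun s i => PySem.Set.union s (pvGetS lights i)) PySem.Set.empty).contains x)
def pvMovesAll (lights : List (Int × List Int)) (new : List Int) (max_volume : Int) : List (Int × Int) :=
  (PySem.List.pyRange (max_volume + 1) 0 (-1)).flatMap (pvSeg lights new max_volume)
    ++ (pvRem lights new max_volume).map (fun x => ((1 : Int), x))

lemma pvMoves_eq (lights : List (Int × List Int)) (new : List Int) (max_volume : Int) :
    (PySem.List.pyRange (max_volume + 1) 0 (-1)).foldl (fun ms i =>
        (PySem.Set.ofList ((PySem.Dict.mk lights).getD i [])).foldl (fun ms x =>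
          if i ≤ max_volume && (PySem.Set.ofList new).contains x then ms ++ [(i + 1, x)]
          else if !(PySem.Set.ofList new).contains x then ms ++ [(i, x)]
          else ms) ms) ([] : List (Int × Int))
      = (PySem.List.pyRange (max_volume + 1) 0 (-1)).flatMap (pvSeg lights new max_volume) := by
  refine Eq.trans (PySem.List.foldl_congr_mem _ _
      (fun ms i => ms ++ pvSeg lights new max_volume i) _ ?_) ?_
  · intro acc i _
    unfold pvSeg pvGetS
    refine Eq.trans (PySem.List.foldl_congr_mem _ _
        (fun ms x => ms ++ pvRoute new max_volume i x) _ ?_)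
      (PySem.List.foldl_append_eq_flatMap _ _ _)
    intro ms x _
    unfold pvRoute
    split_ifs <;> simp_all
  · exact Eq.trans (PySem.List.foldl_append_eq_flatMap _ _ _) (List.nil_append _)

lemma pvOut0_items (max_volume : Int) :
    ((PySem.List.pyRange (max_volume + 1) 0 (-1)).foldl
        (fun o j => o.insert j ([] : List Int)) (PySem.Dict.mk [])).items
      = (PySem.List.pyRange (max_volume + 1) 0 (-1)).map (fun j => (j, ([] : List Int))) := by
  have hnodup : ((PySem.List.pyRange (max_volume + 1) 0 (-1)).map (fun j : Int => j)).Nodup := by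
    simpa using pvNodup_R max_volume
  have hfresh : ∀ a ∈ PySem.List.pyRange (max_volume + 1) 0 (-1),
      (PySem.Dict.mk ([] : List (Int × List Int))).contains ((fun j : Int => j) a) = false :=
    fun a _ => rfl
  have h := PySem.Dict.items_foldl_insert_fresh (PySem.List.pyRange (max_volume + 1) 0 (-1))
    (fun j : Int => j) (fun _ : Int => ([] : List Int))
    (PySem.Dict.mk ([] : List (Int × List Int))) hfresh hnodup
  simpa using h

lemma pvOut0_keys (max_volume : Int) :
    ((PySem.List.pyRange (max_volume + 1) 0 (-1)).foldl
        (fun o j => o.insert j ([] : List Int)) (PySem.Dict.mk [])).keys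
      = PySem.List.pyRange (max_volume + 1) 0 (-1) := by
  simp only [PySem.Dict.keys, pvOut0_items, List.map_map]
  show (PySem.List.pyRange (max_volume + 1) 0 (-1)).map (fun j => j) = _
  simp

lemma pvOut0_getD (max_volume c : Int) :
    ((PySem.List.pyRange (max_volume + 1) 0 (-1)).foldl
        (fun o j => o.insert j ([] : List Int)) (PySem.Dict.mk [])).getD c [] = [] := by
  by_cases hc : c ∈ PySem.List.pyRange (max_volume + 1) 0 (-1)
  · have hmem : (c, ([] : List Int)) ∈ ((PySem.List.pyRange (max_volume + 1) 0 (-1)).foldl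
        (fun o j => o.insert j ([] : List Int)) (PySem.Dict.mk [])).items := by
      rw [pvOut0_items]
      exact List.mem_map_of_mem hc
    have hnd : ((PySem.List.pyRange (max_volume + 1) 0 (-1)).foldl
        (fun o j => o.insert j ([] : List Int)) (PySem.Dict.mk [])).keys.Nodup := by
      rw [pvOut0_keys]
      exact pvNodup_R max_volume
    exact PySem.Dict.getD_of_mem_items _ hmem hnd _
  · apply PySem.Dict.getD_of_not_contains
    rw [← Bool.not_eq_true]
    intro h
    exact hc (by rwa [PySem.Dict.contains_iff_mem_keys, pvOut0_keys] at h)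

lemma pvUpdate_keys_eq (keys ts : List Int) (h : ∀ t ∈ ts, t ∈ keys) :
    PySem.Set.update keys ts = keys := by
  rw [PySem.Set.update_eq_append_filter]
  have hnil : (PySem.Set.ofList ts).filter (fun y => !(PySem.Set.contains keys y)) = [] := by
    apply List.filter_eq_nil_iff.mpr
    intro y hy
    have hy' : y ∈ ts := (PySem.Set.mem_ofList _ _).mp hy
    rw [(PySem.Set.contains_iff _ _).mpr (h y hy')]
    simp
  rw [hnil, List.append_nil]

lemma pvGroup_items (moves : List (Int × Int)) (max_volume : Int)
    (ht : ∀ p ∈ moves, 0 < p.1 ∧ p.1 ≤ max_volume + 1) :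
    (moves.foldl (fun o p => o.modify p.1 [] (fun b => b ++ [p.2]))
        ((PySem.List.pyRange (max_volume + 1) 0 (-1)).foldl
          (fun o j => o.insert j ([] : List Int)) (PySem.Dict.mk []))).items
      = (PySem.List.pyRange (max_volume + 1) 0 (-1)).map
          (fun c => (c, (moves.filter (fun p => p.1 == c)).map (fun p => p.2))) := by
  have hkeys : (moves.foldl (fun o p => o.modify p.1 [] (fun b => b ++ [p.2]))
        ((PySem.List.pyRange (max_volume + 1) 0 (-1)).foldl
          (fun o j => o.insert j ([] : List Int)) (PySem.Dict.mk []))).keys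
      = PySem.List.pyRange (max_volume + 1) 0 (-1) := by
    rw [PySem.Dict.keys_foldl_modify_key, pvOut0_keys]
    apply pvUpdate_keys_eq
    intro t hti
    obtain ⟨p, hp, rfl⟩ := List.mem_map.mp hti
    exact (pvMem_R max_volume p.1).mpr (ht p hp)
  rw [PySem.Dict.items_eq_map_keys _ (by rw [hkeys]; exact pvNodup_R max_volume) [], hkeys]
  apply List.map_congr_left
  intro c _
  rw [PySem.Dict.getD_foldl_modify_append, pvOut0_getD, List.nil_append]

lemma pvBucket (lights : List (Int × List Int)) (new : List Int) (max_volume c : Int)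
    (hc : 1 ≤ c) (hc2 : c ≤ max_volume + 1) :
    ((pvMovesAll lights new max_volume).filter (fun p => p.1 == c)).map (fun p => p.2)
      = (pvKept lights new c ++ (if 2 ≤ c then pvProm lights new (c - 1) else []))
        ++ (if c = 1 then pvRem lights new max_volume else []) := by
  unfold pvMovesAll
  rw [List.filter_append, List.map_append]
  congr 1
  · rw [pvFilter_flatMap]
    obtain ⟨n, hn⟩ : ∃ n : Nat, (n : Int) = max_volume + 1 := ⟨(max_volume + 1).toNat, by omega⟩
    rw [← hn, pvFlatMap_countdown (fun i => (pvSeg lights new max_volume i).filter (fun p => p.1 == c)) c hc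
      (by
        intro i _ hne hne1
        show List.filter (fun p => p.1 == c) (pvSeg lights new max_volume i) = []
        rw [pvSeg_filter, if_neg (by omega), if_neg (by rintro ⟨h2, h3⟩; omega)])]
    rw [if_pos (by omega)]
    rw [pvSeg_filter, if_pos rfl]
    by_cases h2 : 2 ≤ c
    · rw [if_pos (by constructor <;> omega), if_pos h2]
      rw [pvSeg_filter, if_neg (by omega), if_pos (by constructor <;> omega)]
      rw [show c - 1 + 1 = c by ring]
      rw [List.map_append, List.map_map, List.map_map]
      simp
    · rw [if_neg (by omega), if_neg h2]
      rw [List.append_nil, List.append_nil, List.map_map]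
      simp
  · by_cases hc1 : c = 1
    · subst hc1
      rw [if_pos rfl]
      rw [List.filter_eq_self.mpr (by
        intro p hp
        obtain ⟨x, _, rfl⟩ := List.mem_map.mp hp
        simp)]
      rw [List.map_map]
      simp
    · rw [if_neg hc1]
      rw [List.filter_eq_nil_iff.mpr (by
        intro p hp
        obtain ⟨x, _, rfl⟩ := List.mem_map.mp hp
        simp [beq_iff_eq]
        omega)]
      rfl

lemma pvKept_nodup (lights : List (Int × List Int)) (new : List Int) (i : Int) :
    (pvKept lights new i).Nodup :=
  PySem.Set.nodup_diff _ _ (PySem.Set.nodup_ofList _)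

lemma pvProm_nodup (lights : List (Int × List Int)) (new : List Int) (i : Int) :
    (pvProm lights new i).Nodup :=
  PySem.Set.nodup_inter _ _ (PySem.Set.nodup_ofList _)

lemma pvBucketSet_hi (lights : List (Int × List Int)) (new : List Int) (c : Int) :
    PySem.Set.ofList (pvKept lights new c ++ pvProm lights new (c - 1))
      = pvOut lights new (c - 1) := by
  have hd : ∀ x ∈ pvProm lights new (c - 1), x ∉ pvKept lights new c := by
    intro x hx hy
    have h1 := ((PySem.Set.mem_inter _ _ _).mp hx).2
    have h2 := ((PySem.Set.mem_diff _ _ _).mp hy).2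
    exact h2 h1
  rw [pvOfList_append _ _ (pvKept_nodup lights new c) (pvProm_nodup lights new (c - 1)) hd]
  unfold pvOut
  rw [show c - 1 + 1 = c by ring]
  exact (pvUnion_eq_append _ _ (pvProm_nodup lights new (c - 1)) hd).symm

lemma pvRem_eq (lights : List (Int × List Int)) (new : List Int) (max_volume : Int) :
    pvRem lights new max_volume
      = (PySem.Set.ofList new).filter (fun x =>
          (PySem.List.pyRange max_volume 0 (-1)).all (fun i => !(pvGetS lights i).contains x)) := by
  unfold pvRem
  apply List.filter_congr
  intro x _
  by_cases hex : ∃ i ∈ PySem.List.pyRange 1 (max_volume + 1), x ∈ pvGetS lights i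
  · obtain ⟨i, hi, hxi⟩ := hex
    have hi' := PySem.List.mem_pyRange_one.mp hi
    have hcon : ((PySem.List.pyRange 1 (max_volume + 1)).foldl
        (fun s i => PySem.Set.union s (pvGetS lights i)) PySem.Set.empty).contains x = true := by
      rw [PySem.Set.contains_iff, pvMem_foldl_union]
      exact Or.inr ⟨i, hi, hxi⟩
    rw [hcon]
    have : (PySem.List.pyRange max_volume 0 (-1)).all (fun i => !(pvGetS lights i).contains x) = false := by
      rw [List.all_eq_false]
      refine ⟨i, PySem.List.mem_pyRange_neg_one.mpr (by omega), ?_⟩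
      simp [hxi]
    rw [this]
    rfl
  · have hcon : ((PySem.List.pyRange 1 (max_volume + 1)).foldl
        (fun s i => PySem.Set.union s (pvGetS lights i)) PySem.Set.empty).contains x = false := by
      rw [← Bool.not_eq_true, PySem.Set.contains_iff, pvMem_foldl_union]
      rintro (h | h)
      · simp [PySem.Set.empty] at h
      · exact hex h
    rw [hcon]
    have : (PySem.List.pyRange max_volume 0 (-1)).all (fun i => !(pvGetS lights i).contains x) = true := by
      rw [List.all_eq_true]
      intro i hi
      have hi' := PySem.List.mem_pyRange_neg_one.mp hi
      rw [Bool.not_eq_eq_eq_not, Bool.not_true, ← Bool.not_eq_true, PySem.Set.contains_iff]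
      intro hxi
      exact hex ⟨i, PySem.List.mem_pyRange_one.mpr (by omega), hxi⟩
    rw [this]
    rfl

lemma pvRem_nodup (lights : List (Int × List Int)) (new : List Int) (max_volume : Int) :
    (pvRem lights new max_volume).Nodup :=
  List.Nodup.filter _ (PySem.Set.nodup_ofList _)

lemma pvBucketSet_lo (lights : List (Int × List Int)) (new : List Int) (max_volume : Int) :
    PySem.Set.ofList (pvKept lights new 1 ++ pvRem lights new max_volume)
      = PySem.Set.union (pvKept lights new 1)
          ((PySem.List.pyRange max_volume 0 (-1)).foldl
            (fun r i => PySem.Set.diff r (pvGetS lights i)) (PySem.Set.ofList new)) := by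
  have hd : ∀ x ∈ pvRem lights new max_volume, x ∉ pvKept lights new 1 := by
    intro x hx hy
    have h1 : x ∈ PySem.Set.ofList new := List.mem_of_mem_filter hx
    exact ((PySem.Set.mem_diff _ _ _).mp hy).2 h1
  rw [pvOfList_append _ _ (pvKept_nodup lights new 1) (pvRem_nodup lights new max_volume) hd]
  rw [foldl_diff_eq_filter, ← pvRem_eq]
  exact (pvUnion_eq_append _ _ (pvRem_nodup lights new max_volume) hd).symm

lemma pvMovesAll_targets (lights : List (Int × List Int)) (new : List Int) (max_volume : Int)
    (h1 : 1 ≤ max_volume) :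
    ∀ p ∈ pvMovesAll lights new max_volume, 0 < p.1 ∧ p.1 ≤ max_volume + 1 := by
  intro p hp
  rcases List.mem_append.mp hp with h | h
  · obtain ⟨i, hi, hpi⟩ := List.mem_flatMap.mp h
    have hi' := (pvMem_R max_volume i).mp hi
    obtain ⟨x, _, hpx⟩ := List.mem_flatMap.mp hpi
    unfold pvRoute at hpx
    split_ifs at hpx with hA hB
    · rcases List.mem_singleton.mp hpx with rfl
      simp only []
      constructor <;> [omega; (simp only [Bool.and_eq_true, decide_eq_true_eq] at hA; omega)]
    · rcases List.mem_singleton.mp hpx with rfl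
      constructor <;> omega
    · exact absurd hpx (List.not_mem_nil)
  · obtain ⟨x, _, rfl⟩ := List.mem_map.mp h
    constructor <;> omega

lemma turn_on_alt_normal (lights : List (Int × List Int)) (new : List Int) (max_volume : Int)
    (h1 : 1 ≤ max_volume) :
    turn_on_alt lights new max_volume
      = (PySem.List.pyRange (max_volume + 1) 0 (-1)).map
          (fun c => (c, PySem.Set.ofList
            (((pvMovesAll lights new max_volume).filter (fun p => p.1 == c)).map (fun p => p.2)))) := by
  simp only [turn_on_alt]
  rw [if_neg (by simp; omega)]
  rw [pvMoves_eq lights new max_volume]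
  rw [PySem.List.foldl_append_if
    (p := fun x => !((PySem.List.pyRange 1 (max_volume + 1)).foldl
        (fun s i => PySem.Set.union s (PySem.Set.ofList ((PySem.Dict.mk lights).getD i []))) PySem.Set.empty).contains x)
    (f := fun x => ((1 : Int), x))]
  rw [List.nil_append]
  rw [pvGroup_items _ max_volume (by
    have h := pvMovesAll_targets lights new max_volume h1
    unfold pvMovesAll pvRem pvGetS at h
    exact h)]
  rw [List.map_map]
  apply List.map_congr_left
  intro c _
  simp only [Function.comp]
  unfold pvMovesAll pvRem pvGetS
  rfl

-- ===== VERDICT (by name: the statement is the Claim_ definition above) =====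
theorem turn_on_spec : Claim_equal_turn_on := by
  intro lights new max_volume _ hpre
  unfold Spec_turn_on
  by_cases h0 : max_volume = 0
  · subst h0; rfl
  · have h1 : 1 ≤ max_volume := by unfold Pre_turn_on at hpre; omega
    rw [turn_on_normal lights new max_volume h1, turn_on_alt_normal lights new max_volume h1,
      pvR_split max_volume h1, List.map_append, List.map_map]
    congr 1
    · apply List.map_congr_left
      intro i hi
      have hi' := PySem.List.mem_pyRange_neg_one.mp hi
      simp only [Function.comp]
      rw [pvBucket lights new max_volume (i + 1) (by omega) (by omega)]
      rw [if_pos (by omega), if_neg (by omega), List.append_nil]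
      rw [pvBucketSet_hi lights new (i + 1)]
      rw [show i + 1 - 1 = i by ring]
    · simp only [List.map_cons, List.map_nil]
      rw [pvBucket lights new max_volume 1 (by omega) (by omega)]
      rw [if_neg (by omega), if_pos rfl, List.append_nil]
      rw [pvBucketSet_lo lights new max_volume]
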